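-- pv_equiv track=rewrite | github.com/lanterno/molecule_parser | molecule.py | onize_formula
-- ===== SOURCE A (Python) =====
-- def onize_formula(formula=""):
--     """
--     Chemical formulas don't show ones like H2O1, it ignores numbers when it's equal to one.
--     For consistency, we're adding those ones here.
--     input: str
--     output: str
--     This function is idempotent
--     """
--     formula_with_ones = []
--     for element in formula:
--         if element.isdigit():
--             formula_with_ones.append(element)
--         elif element.islower():  # means that it's part of the previous element name
--             formula_with_ones.append(element)
--         else:
--             if formula_with_ones and not formula_with_ones[-1].isdigit() and formula_with_ones[-1] not in ['(', '[']:
--                 formula_with_ones.append('1')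
--             formula_with_ones.append(element)
--
--     if not formula_with_ones[-1].isdigit():
--         formula_with_ones.append('1')
--     return ''.join(formula_with_ones)
-- ===== SOURCE B (Python) =====
-- import re
--
-- def onize_formula(formula=""):
--     # Insert '1' at each zero-width position between a char that is not a digit
--     # and not an opening bracket, and a following char that is neither a digit
--     # nor lowercase; then append a trailing '1' when the last char is not a digit.
--     result = re.sub(r'(?<=[^0-9(\[])(?=[^0-9a-z])', '1', formula)
--     if result and not result[-1].isdigit():
--         result += '1'
--     return result
-- ===== Notes on version B (the rewrite author's own statement) =====
-- stated objective: idiomatic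
-- what changed: Replaces the character-by-character loop that inspects the output accumulator's last element with a single re.sub using a lookbehind/lookahead that inserts the implicit unit count at the qualifying zero-width positions, plus one trailing-char check.
-- outside the precondition, e.g. on onize_formula(''): A raises IndexError, B returns ''
-- crash fix: On the empty string A raises IndexError (it indexes formula_with_ones[-1]); B returns ''. — e.g. on onize_formula(""): A raises IndexError, B returns ""
import Mathlib
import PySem

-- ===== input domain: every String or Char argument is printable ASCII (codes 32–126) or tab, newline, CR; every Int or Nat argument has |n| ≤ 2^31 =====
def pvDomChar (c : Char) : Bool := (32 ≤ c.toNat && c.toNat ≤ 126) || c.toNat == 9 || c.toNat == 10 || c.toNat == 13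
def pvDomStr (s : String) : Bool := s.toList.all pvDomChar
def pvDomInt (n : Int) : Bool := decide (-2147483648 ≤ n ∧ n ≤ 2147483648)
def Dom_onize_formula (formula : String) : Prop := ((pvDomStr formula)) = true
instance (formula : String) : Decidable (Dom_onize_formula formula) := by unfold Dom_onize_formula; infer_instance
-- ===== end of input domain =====

-- B replaces A's stateful accumulator loop with a single regex-style pairwise insertion pass
-- (idiomatic re.sub in Python); on the empty string A raises IndexError (excluded by Pre_) while B returns "".


-- ===== PORT A =====
-- one loop iteration; the accumulator list is kept REVERSED (Python append = cons, [-1] = head)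
def onize_formula_step (r : List Char) (c : Char) : List Char :=
  if PySem.Chars.isdigit c then c :: r
  else if PySem.Chars.islower c then c :: r
  else
    if (match r with
        | [] => false
        | h :: _ => !PySem.Chars.isdigit h && !(h == '(' || h == '[')) then
      c :: '1' :: r
    else c :: r

def onize_formula (formula : String) : String :=
  let r := formula.toList.foldl onize_formula_step []
  match r with
  | [] => ""   -- Python raises IndexError here (formula = ""); excluded by Pre_
  | h :: _ =>
    if PySem.Chars.isdigit h then String.ofList r.reverse
    else String.ofList (r.reverse ++ ['1'])

-- ===== PORT B =====
-- the zero-width regex position of Source B: previous char matches [^0-9(\[] and next char matches [^0-9a-z]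
-- (on the printable-ASCII domain the classes [0-9] and [a-z] are exactly str.isdigit / str.islower)
def onize_formula_alt_ins (p c : Char) : Bool :=
  !(PySem.Chars.isdigit p || p == '(' || p == '[') &&
  !(PySem.Chars.isdigit c || PySem.Chars.islower c)

-- hand port of re.sub for this fixed zero-width pattern: exact — the sub inserts '1' at
-- every interior position whose neighbouring chars satisfy onize_formula_alt_ins
def onize_formula_alt_go : Char → List Char → List Char
  | _, [] => []
  | p, c :: rest => (if onize_formula_alt_ins p c then ['1', c] else [c]) ++ onize_formula_alt_go c rest

def onize_formula_alt (formula : String) : String :=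
  let result : List Char :=
    match formula.toList with
    | [] => []
    | c :: rest => c :: onize_formula_alt_go c rest
  match result.getLast? with
  | none => String.ofList result
  | some h =>
    if PySem.Chars.isdigit h then String.ofList result
    else String.ofList (result ++ ['1'])

-- ===== PRECONDITION & SPEC =====
-- Pre_ excludes exactly the empty string, on which A raises IndexError (formula_with_ones[-1]).
def Pre_onize_formula (formula : String) : Prop := formula ≠ ""
instance (formula : String) : Decidable (Pre_onize_formula formula) := by unfold Pre_onize_formula; infer_instance
def pvWitness_onize_formula : String := "H2O"

-- On the empty string A raises IndexError; B returns "".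
def Raises_onize_formula (formula : String) : Prop := formula = ""
instance (formula : String) : Decidable (Raises_onize_formula formula) := by unfold Raises_onize_formula; infer_instance
def pvRaiseWitness_onize_formula : String := ""
def pvRaiseWitnessOut_onize_formula : String := ""

def Spec_onize_formula (formula : String) (out : String) : Prop := out = onize_formula_alt formula
instance (formula : String) (out : String) : Decidable (Spec_onize_formula formula out) := by unfold Spec_onize_formula; infer_instance

-- ===== CLAIM (what is proved, stated in full; the proofs are below) =====
def Claim_equal_onize_formula : Prop := ∀ (formula : String), Dom_onize_formula formula → Pre_onize_formula formula → Spec_onize_formula formula (onize_formula formula)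
def Claim_raises_onize_formula : Prop := (∀ (formula : String), Dom_onize_formula formula → Raises_onize_formula formula → ¬ Pre_onize_formula formula) ∧ (Dom_onize_formula (pvRaiseWitness_onize_formula) ∧ Raises_onize_formula (pvRaiseWitness_onize_formula) ∧ onize_formula_alt (pvRaiseWitness_onize_formula) = pvRaiseWitnessOut_onize_formula)

-- ===== LEMMAS AND PROOFS =====

-- A's fold over the remaining input, started in a state whose head (= Python's [-1]) is the
-- previously processed char p, appends exactly B's pairwise insertions (reversed).
theorem onize_formula_fold (rest : List Char) : ∀ (p : Char) (r : List Char), r.head? = some p →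
    List.foldl onize_formula_step r rest = (onize_formula_alt_go p rest).reverse ++ r := by
  induction rest with
  | nil => intro p r _; simp [onize_formula_alt_go]
  | cons c rest ih =>
    intro p r hr
    obtain ⟨t, rfl⟩ : ∃ t, r = p :: t := by
      cases r with
      | nil => simp at hr
      | cons a t => simp at hr; exact ⟨t, by rw [hr]⟩
    simp only [List.foldl_cons, onize_formula_alt_go, onize_formula_step]
    by_cases hd : PySem.Chars.isdigit c = true
    · have hif : ¬ (onize_formula_alt_ins p c = true) := by
        simp [onize_formula_alt_ins, hd]
      rw [if_pos hd, if_neg hif, ih c (c :: p :: t) rfl]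
      simp
    · by_cases hl : PySem.Chars.islower c = true
      · have hif : ¬ (onize_formula_alt_ins p c = true) := by
          simp [onize_formula_alt_ins, hl]
        rw [if_neg hd, if_pos hl, if_neg hif, ih c (c :: p :: t) rfl]
        simp
      · rw [if_neg hd, if_neg hl]
        have hi : onize_formula_alt_ins p c = true ↔
            (!PySem.Chars.isdigit p && !(p == '(' || p == '[')) = true := by
          simp [onize_formula_alt_ins, hd, hl, Bool.and_assoc]
        by_cases hb : (!PySem.Chars.isdigit p && !(p == '(' || p == '[')) = true
        · rw [if_pos hb, if_pos (hi.mpr hb), ih c (c :: '1' :: p :: t) rfl]; simp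
        · rw [if_neg hb, if_neg (fun h => hb (hi.mp h)), ih c (c :: p :: t) rfl]; simp

theorem onize_formula_first (c : Char) : onize_formula_step [] c = [c] := by
  simp only [onize_formula_step]
  split_ifs <;> simp_all

-- ===== VERDICT (by name: the statement is the Claim_ definition above) =====
theorem onize_formula_spec : Claim_equal_onize_formula := by
  intro formula _ hpre
  unfold Spec_onize_formula onize_formula onize_formula_alt
  cases hl : formula.toList with
  | nil => exact absurd (String.toList_eq_nil_iff.mp hl) hpre
  | cons c rest =>
    simp only [List.foldl_cons, onize_formula_first]
    rw [onize_formula_fold rest c [c] rfl]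
    have hres : ((onize_formula_alt_go c rest).reverse ++ [c]).reverse
        = c :: onize_formula_alt_go c rest := by simp
    rw [← hres, List.getLast?_reverse]
    cases hL : (onize_formula_alt_go c rest).reverse ++ [c] with
    | nil => simp at hL
    | cons h t => rfl

def onize_formula_raises : Claim_raises_onize_formula := by
  unfold Claim_raises_onize_formula
  constructor
  · intro f _ hr hp; exact hp hr
  · exact ⟨by decide, rfl, by decide⟩
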